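-- pv_equiv track=rewrite | github.com/inaciovasquez2020/overlap-rigidity-counterexamples | scripts/overlap_proxy.py | max_triangles_through_vertex
-- ===== SOURCE A (Python) =====
-- def max_triangles_through_vertex(adj):
--     n = len(adj)
--     best = 0
--     for v in range(n):
--         Nv = set(adj[v])
--         tv = 0
--         for a in Nv:
--             for b in Nv:
--                 if a < b and a in adj[b]:
--                     tv += 1
--         best = max(best, tv)
--     return best
-- ===== SOURCE B (Python) =====
-- def max_triangles_through_vertex(adj):
--     S = [set(row) for row in adj]
--     best = 0
--     for Nv in S:
--         tv = 0
--         if Nv: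
--             mn = min(Nv)
--             for b in Nv:
--                 if b > mn:  # b = min(Nv) can have no neighbor a < b
--                     tv += sum(1 for a in S[b] if a < b and a in Nv)
--         best = max(best, tv)
--     return best
-- ===== Notes on version B (the rewrite author's own statement) =====
-- stated objective: alternative
-- what changed: B precomputes one neighbor set per vertex and, for each vertex, sums over b in Nv (skipping min(Nv)) the count of a in S[b] with a < b and a in Nv, replacing A's Nv x Nv double loop with an inner list-membership scan by a single loop over b with O(1) set lookups.
import Mathlib
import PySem

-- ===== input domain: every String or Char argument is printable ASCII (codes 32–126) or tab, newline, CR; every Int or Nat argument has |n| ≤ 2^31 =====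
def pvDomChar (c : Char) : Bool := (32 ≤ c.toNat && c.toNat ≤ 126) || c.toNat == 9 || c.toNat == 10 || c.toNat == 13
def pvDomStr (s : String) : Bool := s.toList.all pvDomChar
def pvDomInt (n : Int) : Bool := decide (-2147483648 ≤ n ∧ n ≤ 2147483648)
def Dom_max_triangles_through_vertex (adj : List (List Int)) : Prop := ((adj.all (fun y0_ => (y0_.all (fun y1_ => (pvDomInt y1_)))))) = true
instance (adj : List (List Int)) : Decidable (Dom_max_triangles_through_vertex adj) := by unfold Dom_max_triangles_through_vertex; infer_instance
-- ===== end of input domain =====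

-- B restructures A's Nv × Nv double loop (with a list-membership scan inside): it precomputes
-- per-vertex neighbor sets and, for each b ∈ Nv above min(Nv), counts a ∈ S[b] with a < b and
-- a ∈ Nv by set membership (objective: alternative).

-- ===== PORT A =====
def max_triangles_through_vertex (adj : List (List Int)) : Int :=
  let n : Int := adj.length
  (PySem.List.pyRange 0 n 1).foldl (fun best v =>
    let Nv : PySem.Set Int := PySem.Set.ofList (PySem.List.pyGetD adj v [])
    let tv : Int := Nv.foldl (fun tv a =>
      Nv.foldl (fun tv b =>
        if a < b ∧ a ∈ PySem.List.pyGetD adj b [] then tv + 1 else tv) tv) 0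
    max best tv) 0

-- ===== PORT B =====
def max_triangles_through_vertex_alt (adj : List (List Int)) : Int :=
  let S : List (PySem.Set Int) := adj.map PySem.Set.ofList
  S.foldl (fun best Nv =>
    let tv : Int :=
      match PySem.List.min? Nv (fun y => y) with
      | none => 0
      | some mn =>
        Nv.foldl (fun tv b =>
          if b > mn then
            tv + ((PySem.List.pyGetD S b []).countP (fun a => decide (a < b ∧ a ∈ Nv)) : Int)
          else tv) 0
    max best tv) 0

-- ===== PRECONDITION & SPEC =====
-- Pre_ excludes exactly the inputs on which the Pythons raise IndexError: a row containing
-- an out-of-range id b next to a smaller entry a < b (A's lazy 'a < b and a in adj[b]' then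
-- dereferences adj[b]; B dereferences S[b] exactly for the b above min of the row's set).
def Pre_max_triangles_through_vertex (adj : List (List Int)) : Prop :=
  ∀ row ∈ adj, ∀ b ∈ row, (∃ a ∈ row, a < b) → PySem.Raise.InRange adj.length b
instance (adj : List (List Int)) : Decidable (Pre_max_triangles_through_vertex adj) := by
  unfold Pre_max_triangles_through_vertex; infer_instance
def pvWitness_max_triangles_through_vertex : List (List Int) := [[1, 2], [0, 2], [0, 1]]

def Spec_max_triangles_through_vertex (adj : List (List Int)) (out : Int) : Prop := out = max_triangles_through_vertex_alt adj
instance (adj : List (List Int)) (out : Int) : Decidable (Spec_max_triangles_through_vertex adj out) := by unfold Spec_max_triangles_through_vertex; infer_instance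

-- ===== CLAIM (what is proved, stated in full; the proofs are below) =====
def Claim_equal_max_triangles_through_vertex : Prop := ∀ (adj : List (List Int)), Dom_max_triangles_through_vertex adj → Pre_max_triangles_through_vertex adj → Spec_max_triangles_through_vertex adj (max_triangles_through_vertex adj)

-- ===== LEMMAS AND PROOFS =====

-- per-row value computed by A's inner double loop
def pvGA (adj : List (List Int)) (row : List Int) : Int :=
  (PySem.Set.ofList row).foldl (fun tv a =>
    (PySem.Set.ofList row).foldl (fun tv b =>
      if a < b ∧ a ∈ PySem.List.pyGetD adj b [] then tv + 1 else tv) tv) 0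

-- per-row value computed by B's inner loop
def pvGB (adj : List (List Int)) (Nv : PySem.Set Int) : Int :=
  match PySem.List.min? Nv (fun y => y) with
  | none => 0
  | some mn =>
    Nv.foldl (fun tv b =>
      if b > mn then
        tv + ((PySem.List.pyGetD (adj.map PySem.Set.ofList) b []).countP
                (fun a => decide (a < b ∧ a ∈ Nv)) : Int)
      else tv) 0

theorem pvA_eq (adj : List (List Int)) :
    max_triangles_through_vertex adj = adj.foldl (fun best row => max best (pvGA adj row)) 0 := by
  simp only [max_triangles_through_vertex, pvGA]
  exact PySem.List.foldl_pyRange_zero_pyGetD' adj []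
    (fun best row => max best ((PySem.Set.ofList row).foldl (fun tv a =>
      (PySem.Set.ofList row).foldl (fun tv b =>
        if a < b ∧ a ∈ PySem.List.pyGetD adj b [] then tv + 1 else tv) tv) 0)) 0

theorem pvB_eq (adj : List (List Int)) :
    max_triangles_through_vertex_alt adj
      = adj.foldl (fun best row => max best (pvGB adj (PySem.Set.ofList row))) 0 := by
  simp only [max_triangles_through_vertex_alt, pvGB]
  rw [List.foldl_map]

theorem pvRow_eq (adj : List (List Int)) (row : List Int) :
    pvGA adj row = pvGB adj (PySem.Set.ofList row) := by
  set Nv : PySem.Set Int := PySem.Set.ofList row with hNv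
  have hnd : Nv.Nodup := PySem.Set.nodup_ofList row
  -- A's per-row loop as a sum of counts over a
  have hA : pvGA adj row
      = (Nv.map (fun a => ((Nv.countP (fun b => decide (a < b ∧ a ∈ PySem.List.pyGetD adj b []))) : Int))).sum := by
    unfold pvGA
    rw [PySem.List.foldl_congr_mem Nv _
      (fun tv a => tv + ((Nv.countP (fun b => decide (a < b ∧ a ∈ PySem.List.pyGetD adj b []))) : Int)) 0
      (fun tv a _ => PySem.List.foldl_ite_add_one _ Nv tv)]
    rw [PySem.List.foldl_add]
    simp
  rw [hA]
  -- B's per-row loop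
  unfold pvGB
  rcases hcons : Nv with _ | ⟨x, t⟩
  · simp [PySem.List.min?]
  · rw [← hcons]
    have hmin : PySem.List.min? Nv (fun y => y) = some (t.foldl min x) := by
      rw [hcons]; exact PySem.List.min?_id_cons x t
    rw [hmin]
    dsimp only
    set mn : Int := t.foldl min x with hmn
    have hmnle : ∀ y ∈ Nv, mn ≤ y := by
      intro y hy
      rw [hcons] at hy
      rcases List.mem_cons.mp hy with h | h
      · rw [h]; exact (PySem.List.foldl_min_le t x).1
      · exact (PySem.List.foldl_min_le t x).2 y h
    have hB : Nv.foldl (fun tv b =>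
        if b > mn then
          tv + ((PySem.List.pyGetD (adj.map PySem.Set.ofList) b []).countP
                  (fun a => decide (a < b ∧ a ∈ Nv)) : Int)
        else tv) 0
      = (Nv.map (fun b => if mn < b then
          (((PySem.Set.ofList (PySem.List.pyGetD adj b [])).countP (fun a => decide (a < b ∧ a ∈ Nv))) : Int)
        else 0)).sum := by
      rw [PySem.List.foldl_congr_mem Nv _
        (fun tv b => tv + (if mn < b then
            (((PySem.Set.ofList (PySem.List.pyGetD adj b [])).countP (fun a => decide (a < b ∧ a ∈ Nv))) : Int)
          else 0)) 0
        (fun tv b _ => by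
          dsimp only
          have h := PySem.List.pyGetD_map PySem.Set.ofList adj b []
          simp only [show PySem.Set.ofList ([] : List Int) = [] from rfl] at h
          rw [h]
          by_cases hq : mn < b
          · rw [if_pos hq, if_pos hq]
          · rw [if_neg hq, if_neg hq, add_zero])]
      rw [PySem.List.foldl_add]
      simp
    rw [hB]
    -- both sides as double sums of indicators over the finset of Nv
    rw [← List.sum_toFinset _ hnd, ← List.sum_toFinset _ hnd]
    have hcA : ∀ a : Int,
        ((Nv.countP (fun b => decide (a < b ∧ a ∈ PySem.List.pyGetD adj b []))) : Int)
          = ∑ b ∈ Nv.toFinset, (if a < b ∧ a ∈ PySem.List.pyGetD adj b [] then (1 : Int) else 0) := by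
      intro a
      rw [← PySem.List.sum_map_ite_one_zero, ← List.sum_toFinset _ hnd]
      simp
    simp only [hcA]
    rw [Finset.sum_comm]
    refine Finset.sum_congr rfl ?_
    intro b hbF
    by_cases hq : mn < b
    · -- b above the minimum: both sides count Nv ∩ adj[b] ∩ {· < b}
      rw [if_pos hq]
      set L : List Int := PySem.List.pyGetD adj b [] with hL
      have hndL : (PySem.Set.ofList L).Nodup := PySem.Set.nodup_ofList L
      have hRHS : (((PySem.Set.ofList L).countP (fun a => decide (a < b ∧ a ∈ Nv))) : Int)
          = ∑ a ∈ (PySem.Set.ofList L).toFinset, (if a < b ∧ a ∈ Nv then (1 : Int) else 0) := by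
        rw [← PySem.List.sum_map_ite_one_zero, ← List.sum_toFinset _ hndL]
        simp
      rw [hRHS]
      have hfil : Nv.toFinset.filter (fun a => a < b ∧ a ∈ L)
          = (PySem.Set.ofList L).toFinset.filter (fun a => a < b ∧ a ∈ Nv) := by
        ext a
        simp only [Finset.mem_filter, List.mem_toFinset, PySem.Set.mem_ofList]
        tauto
      rw [← Finset.sum_filter, ← Finset.sum_filter, hfil]
    · -- b at the minimum of the row's set: no a ∈ Nv is below b, both sides are 0
      rw [if_neg hq]
      refine Finset.sum_eq_zero ?_
      intro a haF
      have hale : mn ≤ a := hmnle a (List.mem_toFinset.mp haF)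
      have hnolt : ¬ (a < b) := by omega
      simp [hnolt]

-- ===== VERDICT (by name: the statement is the Claim_ definition above) =====
theorem max_triangles_through_vertex_spec : Claim_equal_max_triangles_through_vertex := by
  intro adj _ _
  unfold Spec_max_triangles_through_vertex
  rw [pvA_eq, pvB_eq]
  exact PySem.List.foldl_congr_mem _ _ _ _ (fun acc row _ => by rw [pvRow_eq adj row])
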